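-- pv_equiv track=rewrite | github.com/khiba-k/holbertonschool-Markdown2HTML | markdown2html.py | convert_ordered_lists
-- ===== SOURCE A (Python) =====
-- def convert_ordered_lists(markdown_text):
--     """Convert markdown ordered lists to HTML format."""
--     html_lines = []
--     in_list = False
--
--     for line in markdown_text.split("\n"):
--         stripped_line = line.strip()
--         if stripped_line.startswith("* "):
--             if not in_list:
--                 html_lines.append("<ol>")
--                 in_list = True
--             content = stripped_line[2:].strip()
--             html_lines.append(f"<li>{content}</li>")
--         else:
--             if in_list:
--                 html_lines.append("</ol>")
--                 in_list = False
--             html_lines.append(line)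
--
--     if in_list:
--         html_lines.append("</ol>")
--
--     return "\n".join(html_lines)
-- ===== SOURCE B (Python) =====
-- def convert_ordered_lists(markdown_text):
--     """Convert markdown ordered lists to HTML format."""
--     lines = markdown_text.split("\n")
--     out = []
--     i = 0
--     n = len(lines)
--     while i < n:
--         if lines[i].strip().startswith("* "):
--             j = i
--             while j < n and lines[j].strip().startswith("* "):
--                 j += 1
--             out.append("<ol>")
--             for line in lines[i:j]:
--                 out.append("<li>{}</li>".format(line.strip()[2:].strip()))
--             out.append("</ol>")
--             i = j
--         else:
--             out.append(lines[i])
--             i += 1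
--     return "\n".join(out)
-- ===== Notes on version B (the rewrite author's own statement) =====
-- stated objective: alternative
-- what changed: Replaces the in_list flag state machine with run-grouping: scan each maximal consecutive run of markdown list-item lines and wrap the whole run in an ol element at once.
import Mathlib
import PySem

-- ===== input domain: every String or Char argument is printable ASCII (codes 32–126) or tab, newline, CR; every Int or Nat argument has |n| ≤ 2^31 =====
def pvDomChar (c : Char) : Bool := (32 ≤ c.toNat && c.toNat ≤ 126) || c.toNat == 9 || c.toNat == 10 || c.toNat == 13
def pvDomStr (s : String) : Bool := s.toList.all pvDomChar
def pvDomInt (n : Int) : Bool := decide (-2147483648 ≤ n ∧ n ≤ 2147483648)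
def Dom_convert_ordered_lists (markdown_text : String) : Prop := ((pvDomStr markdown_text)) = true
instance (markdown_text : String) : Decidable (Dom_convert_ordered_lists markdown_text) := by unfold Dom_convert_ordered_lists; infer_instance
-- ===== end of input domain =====

-- B groups maximal runs of markdown list-item lines instead of carrying A's in_list flag (alternative decomposition, same cost).

-- ===== PORT A =====
-- loop body of A: state = (html_lines, in_list)
def aStep (st : List (List Char) × Bool) (line : List Char) : List (List Char) × Bool :=
  let stripped := PySem.Chars.strip line
  if PySem.Chars.startswith stripped ['*', ' '] then
    let st1 := if !st.2 then (st.1 ++ [['<','o','l','>']], true) else st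
    let content := PySem.Chars.strip (PySem.List.slice stripped (some 2) none)
    (st1.1 ++ [['<','l','i','>'] ++ content ++ ['<','/','l','i','>']], st1.2)
  else
    let st1 := if st.2 then (st.1 ++ [['<','/','o','l','>']], false) else st
    (st1.1 ++ [line], st1.2)

def convert_ordered_lists (markdown_text : String) : String :=
  let fin := (PySem.Chars.splitOn markdown_text.toList ['\n']).foldl aStep ([], false)
  let html_lines := if fin.2 then fin.1 ++ [['<','/','o','l','>']] else fin.1
  String.ofList (PySem.Chars.join ['\n'] html_lines)

-- ===== PORT B =====
def altLi (line : List Char) : Bool :=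
  PySem.Chars.startswith (PySem.Chars.strip line) ['*', ' ']

def altItem (line : List Char) : List Char :=
  ['<','l','i','>'] ++ PySem.Chars.strip (PySem.List.slice (PySem.Chars.strip line) (some 2) none)
    ++ ['<','/','l','i','>']

-- run-grouping: a maximal run of list lines becomes <ol>, its items, </ol>; other lines pass through
def altGo : List (List Char) → List (List Char)
  | [] => []
  | l :: rest =>
    if altLi l then
      ['<','o','l','>'] :: ((l :: rest).takeWhile altLi).map altItem
        ++ ['<','/','o','l','>'] :: altGo ((l :: rest).dropWhile altLi)
    else l :: altGo rest
termination_by lines => lines.length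
decreasing_by
  all_goals simp_all
  exact List.length_dropWhile_le altLi rest

def convert_ordered_lists_alt (markdown_text : String) : String :=
  String.ofList (PySem.Chars.join ['\n'] (altGo (PySem.Chars.splitOn markdown_text.toList ['\n'])))

-- ===== PRECONDITION & SPEC =====
def Spec_convert_ordered_lists (markdown_text : String) (out : String) : Prop := out = convert_ordered_lists_alt markdown_text
instance (markdown_text : String) (out : String) : Decidable (Spec_convert_ordered_lists markdown_text out) := by unfold Spec_convert_ordered_lists; infer_instance

-- ===== CLAIM (what is proved, stated in full; the proofs are below) =====
def Claim_equal_convert_ordered_lists : Prop := ∀ (markdown_text : String), Dom_convert_ordered_lists markdown_text → Spec_convert_ordered_lists markdown_text (convert_ordered_lists markdown_text)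

-- ===== LEMMAS AND PROOFS =====
-- A's state machine, rephrased as "the lines still to be emitted given the in_list flag"
def aGo : List (List Char) → Bool → List (List Char)
  | [], inL => if inL then [['<','/','o','l','>']] else []
  | l :: rest, inL =>
    if altLi l then
      (if inL then [] else [['<','o','l','>']]) ++ altItem l :: aGo rest true
    else
      (if inL then [['<','/','o','l','>']] else []) ++ l :: aGo rest false

theorem altGo_nil : altGo [] = [] := by rw [altGo.eq_def]

theorem altGo_cons (l : List Char) (rest : List (List Char)) :
    altGo (l :: rest) =
      if altLi l then
        ['<','o','l','>'] :: ((l :: rest).takeWhile altLi).map altItem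
          ++ ['<','/','o','l','>'] :: altGo ((l :: rest).dropWhile altLi)
      else l :: altGo rest := by
  rw [altGo.eq_def]

theorem aFold_eq_aGo : ∀ (lines : List (List Char)) (acc : List (List Char)) (inL : Bool),
    (if (lines.foldl aStep (acc, inL)).2 then (lines.foldl aStep (acc, inL)).1 ++ [['<','/','o','l','>']]
     else (lines.foldl aStep (acc, inL)).1) = acc ++ aGo lines inL := by
  intro lines
  induction lines with
  | nil => intro acc inL; cases inL <;> simp [aGo]
  | cons l rest ih =>
    intro acc inL
    by_cases h : altLi l
    · simp only [altLi] at h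
      cases inL <;> simp [List.foldl_cons, aStep, aGo, altLi, altItem, h, ih]
    · simp only [altLi] at h
      cases inL <;> simp [List.foldl_cons, aStep, aGo, altLi, altItem, h, ih]

theorem aGo_eq_altGo (lines : List (List Char)) :
    aGo lines false = altGo lines ∧
    aGo lines true = (lines.takeWhile altLi).map altItem
      ++ ['<','/','o','l','>'] :: altGo (lines.dropWhile altLi) := by
  induction lines with
  | nil => simp [aGo, altGo_nil]
  | cons l rest ih =>
    by_cases h : altLi l
    · refine ⟨?_, ?_⟩
      · rw [aGo, altGo_cons]
        simp [h, ih.2]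
      · rw [aGo]
        simp [h, ih.2]
    · refine ⟨?_, ?_⟩
      · rw [aGo, altGo_cons]; simp [h, ih.1]
      · rw [aGo]
        simp [h, altGo_cons, ih.1]

-- ===== VERDICT (by name: the statement is the Claim_ definition above) =====
theorem convert_ordered_lists_spec : Claim_equal_convert_ordered_lists := by
  intro s _
  have h := aFold_eq_aGo (PySem.Chars.splitOn s.toList ['\n']) [] false
  simp only [List.nil_append] at h
  exact congrArg (fun hl => String.ofList (PySem.Chars.join ['\n'] hl))
    (h.trans (aGo_eq_altGo _).1)
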